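-- pv_equiv track=rewrite | github.com/asadbekrakhmonjonov/Python-getting-started | defining iteration/all the longest in the list.py | all_the_longest
-- ===== SOURCE A (Python) =====
-- def all_the_longest(my_list):
--     n = 0
--     longest = my_list[n]
--     equal = []
--
--     for words in my_list:
--         if len(words) > len(longest):
--             longest = words
--             equal = [longest]
--         elif len(words) == len(longest):
--             equal.append(words)
--
--     return equal
-- ===== SOURCE B (Python) =====
-- def all_the_longest(my_list):
--     longest_len = len(my_list[0])
--     for w in my_list:
--         if len(w) > longest_len:
--             longest_len = len(w)
--     return [w for w in my_list if len(w) == longest_len]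
-- ===== Notes on version B (the rewrite author's own statement) =====
-- stated objective: simpler
-- what changed: A tracks the current longest word and a running result list that it resets on each new maximum; B first computes only the maximum length and then collects the matching words in a filtering comprehension (find-max-then-filter, two plain passes).
import Mathlib
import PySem

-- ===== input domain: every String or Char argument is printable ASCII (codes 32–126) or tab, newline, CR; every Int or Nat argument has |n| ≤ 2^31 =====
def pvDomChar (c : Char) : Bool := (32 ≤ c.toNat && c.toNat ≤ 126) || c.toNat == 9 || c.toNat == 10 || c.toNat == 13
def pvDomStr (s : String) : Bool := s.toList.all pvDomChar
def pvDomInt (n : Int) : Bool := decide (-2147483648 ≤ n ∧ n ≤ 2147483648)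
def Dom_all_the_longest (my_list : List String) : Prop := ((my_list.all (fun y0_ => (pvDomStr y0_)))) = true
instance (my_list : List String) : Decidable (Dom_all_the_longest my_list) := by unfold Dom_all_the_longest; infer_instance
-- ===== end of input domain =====

-- B replaces A's single pass with a resettable accumulator by a two-pass find-max-then-filter
-- decomposition (objective: simpler); return values agree on every non-empty list.

-- ===== PORT A =====
-- A's loop state: (longest, equal); branches in A's order.
def all_the_longest (my_list : List String) : List String :=
  match PySem.List.pyGet? my_list 0 with
  | none => []   -- unreachable under Pre_: Python raises IndexError here
  | some first =>
    let st := my_list.foldl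
      (fun (s : String × List String) words =>
        if PySem.Str.len words > PySem.Str.len s.1 then (words, [words])
        else if PySem.Str.len words = PySem.Str.len s.1 then (s.1, s.2 ++ [words])
        else s)
      (first, [])
    st.2

-- ===== PORT B =====
-- B's two passes: fold computing the maximum length, then a filter.
def all_the_longest_alt (my_list : List String) : List String :=
  match PySem.List.pyGet? my_list 0 with
  | none => []   -- unreachable under Pre_: Python raises IndexError here
  | some first =>
    let longest_len := my_list.foldl
      (fun m w => if PySem.Str.len w > m then PySem.Str.len w else m)
      (PySem.Str.len first)
    my_list.filter (fun w => PySem.Str.len w = longest_len)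

-- ===== PRECONDITION & SPEC =====
-- Pre_ excludes only the empty list, on which Python A raises IndexError.
def Pre_all_the_longest (my_list : List String) : Prop := my_list ≠ []
instance (my_list : List String) : Decidable (Pre_all_the_longest my_list) := by
  unfold Pre_all_the_longest; infer_instance
def pvWitness_all_the_longest : List String := (["ab", "c", "de"])

def Spec_all_the_longest (my_list : List String) (out : List String) : Prop := out = all_the_longest_alt my_list
instance (my_list : List String) (out : List String) : Decidable (Spec_all_the_longest my_list out) := by unfold Spec_all_the_longest; infer_instance

-- ===== CLAIM (what is proved, stated in full; the proofs are below) =====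
def Claim_equal_all_the_longest : Prop := ∀ (my_list : List String), Dom_all_the_longest my_list → Pre_all_the_longest my_list → Spec_all_the_longest my_list (all_the_longest my_list)

-- ===== LEMMAS AND PROOFS =====

-- A's step function, named for the lemmas.
def stepA (s : String × List String) (words : String) : String × List String :=
  if PySem.Str.len words > PySem.Str.len s.1 then (words, [words])
  else if PySem.Str.len words = PySem.Str.len s.1 then (s.1, s.2 ++ [words])
  else s

-- B's running maximum, named for the lemmas.
def maxLen (m : Int) (w : String) : Int := max m (PySem.Str.len w)

-- B's step equals a running max of lengths.
lemma stepB_eq_max (m : Int) (w : String) :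
    (if PySem.Str.len w > m then PySem.Str.len w else m) = maxLen m w := by
  unfold maxLen; by_cases h : PySem.Str.len w > m
  · rw [if_pos h]; omega
  · rw [if_neg h]; omega

-- The running max never drops below its seed.
lemma seed_le_foldl_maxLen (l : List String) : ∀ (m : Int), m ≤ l.foldl maxLen m := by
  induction l with
  | nil => intro m; simp
  | cons w t ih =>
    intro m
    have h1 : m ≤ maxLen m w := by unfold maxLen; omega
    calc m ≤ t.foldl maxLen (maxLen m w) := le_trans h1 (ih _)
      _ = (w :: t).foldl maxLen m := by rw [List.foldl_cons]

-- Characterisation of A's fold: the kept word has the running maximal length, and the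
-- accumulated list is e (kept iff no strictly longer word appears) followed by the
-- words of maximal length.
lemma foldA_char (l : List String) : ∀ (a : String) (e : List String),
    PySem.Str.len (l.foldl stepA (a, e)).1 = l.foldl maxLen (PySem.Str.len a) ∧
    (l.foldl stepA (a, e)).2
      = (if PySem.Str.len a = l.foldl maxLen (PySem.Str.len a) then e else [])
        ++ l.filter (fun w => PySem.Str.len w = l.foldl maxLen (PySem.Str.len a)) := by
  induction l with
  | nil => intro a e; simp
  | cons w t ih =>
    intro a e
    by_cases h1 : PySem.Str.len w > PySem.Str.len a
    · -- reset branch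
      have hs : stepA (a, e) w = (w, [w]) := by unfold stepA; rw [if_pos h1]
      have hM : maxLen (PySem.Str.len a) w = PySem.Str.len w := by unfold maxLen; omega
      obtain ⟨ih1, ih2⟩ := ih w [w]
      have hge : PySem.Str.len w ≤ t.foldl maxLen (PySem.Str.len w) :=
        seed_le_foldl_maxLen t _
      have hane : ¬ (PySem.Str.len a = t.foldl maxLen (PySem.Str.len w)) := by omega
      simp only [List.foldl_cons, hs, hM]
      refine ⟨ih1, ?_⟩
      rw [ih2, List.filter_cons, if_neg hane]
      by_cases hw : PySem.Str.len w = t.foldl maxLen (PySem.Str.len w)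
      · rw [if_pos hw, if_pos (decide_eq_true hw)]; simp
      · rw [if_neg hw, if_neg (by simpa using hw)]
    · by_cases h2 : PySem.Str.len w = PySem.Str.len a
      · -- append branch
        have hs : stepA (a, e) w = (a, e ++ [w]) := by
          unfold stepA; rw [if_neg h1, if_pos h2]
        have hM : maxLen (PySem.Str.len a) w = PySem.Str.len a := by unfold maxLen; omega
        obtain ⟨ih1, ih2⟩ := ih a (e ++ [w])
        simp only [List.foldl_cons, hs, hM]
        refine ⟨ih1, ?_⟩
        rw [ih2, List.filter_cons]
        by_cases ha : PySem.Str.len a = t.foldl maxLen (PySem.Str.len a)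
        · have hw : PySem.Str.len w = t.foldl maxLen (PySem.Str.len a) := by omega
          rw [if_pos ha, if_pos ha, if_pos (decide_eq_true hw)]; simp
        · have hw : ¬ (PySem.Str.len w = t.foldl maxLen (PySem.Str.len a)) := by omega
          rw [if_neg ha, if_neg ha, if_neg (by simpa using hw)]
      · -- skip branch
        have hs : stepA (a, e) w = (a, e) := by
          unfold stepA; rw [if_neg h1, if_neg h2]
        have hM : maxLen (PySem.Str.len a) w = PySem.Str.len a := by unfold maxLen; omega
        obtain ⟨ih1, ih2⟩ := ih a e
        have hge : PySem.Str.len a ≤ t.foldl maxLen (PySem.Str.len a) :=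
          seed_le_foldl_maxLen t _
        have hw : ¬ (PySem.Str.len w = t.foldl maxLen (PySem.Str.len a)) := by omega
        simp only [List.foldl_cons, hs, hM]
        refine ⟨ih1, ?_⟩
        rw [ih2, List.filter_cons]
        congr 1
        rw [if_neg (by simpa using hw)]

-- ===== VERDICT (by name: the statement is the Claim_ definition above) =====
theorem all_the_longest_spec : Claim_equal_all_the_longest := by
  intro my_list _ hpre
  unfold Spec_all_the_longest
  match my_list, hpre with
  | h :: t, _ =>
    unfold all_the_longest all_the_longest_alt
    rw [PySem.List.pyGet?_zero_cons]
    simp only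
    have hA : (h :: t).foldl
        (fun (s : String × List String) words =>
          if PySem.Str.len words > PySem.Str.len s.1 then (words, [words])
          else if PySem.Str.len words = PySem.Str.len s.1 then (s.1, s.2 ++ [words])
          else s) (h, [])
        = (h :: t).foldl stepA (h, []) := rfl
    have hB : (h :: t).foldl
        (fun m w => if PySem.Str.len w > m then PySem.Str.len w else m) (PySem.Str.len h)
        = (h :: t).foldl maxLen (PySem.Str.len h) :=
      PySem.List.foldl_congr_mem _ _ _ _ (fun m w _ => stepB_eq_max m w)
    rw [hA, hB, (foldA_char (h :: t) h []).2]
    simp
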